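-- pv_equiv track=rewrite | github.com/EXboys/evotown | backend/services/chronicle.py | _virtual_sanguo_date
-- ===== SOURCE A (Python) =====
-- _SANGUO_ERAS: list[tuple[str, int]] = [
--     ("建安", 25),   # 196–220 AD，章 1–300
--     ("黄初",  7),   # 220–226 AD，章 301–384
--     ("太和",  6),   # 227–232 AD
--     ("青龙",  4),   # 233–236 AD
--     ("景初",  3),   # 237–239 AD
--     ("正始", 10),   # 240–249 AD
--     ("嘉平",  6),   # 249–254 AD
--     ("正元",  3),   # 254–256 AD
--     ("甘露",  5),   # 256–260 AD
--     ("景元",  5),   # 260–264 AD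
--     ("咸熙",  2),   # 264–265 AD（魏终）
--     ("泰始", 10),   # 265–274 AD（西晋开国）
--     ("咸宁",  6),   # 275–280 AD（天下归晋）
-- ]
--
-- _LUNAR_MONTHS = ["正", "二", "三", "四", "五", "六", "七", "八", "九", "十", "冬", "腊"]
--
-- _CN_YEAR = ["", "一", "二", "三", "四", "五", "六", "七", "八", "九", "十",
--             "十一", "十二", "十三", "十四", "十五", "十六", "十七", "十八", "十九", "二十",
--             "二十一", "二十二", "二十三", "二十四", "二十五"]
--
-- def _cn_year_str(n: int) -> str:
--     if n == 1:
--         return "元年"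
--     return (_CN_YEAR[n] if n < len(_CN_YEAR) else str(n)) + "年"
--
-- def _virtual_sanguo_date(chapter: int) -> str:
--     """将章号转换为虚拟三国纪年，如「建安元年正月」「黄初三年七月」。"""
--     total_months = chapter - 1          # 0-indexed 月份总数
--     year_offset = total_months // 12    # 已过去多少虚拟年
--     month_idx = total_months % 12       # 本回是第几月（0-indexed）
--
--     remaining = year_offset
--     era_name, year_in_era = "建安", 1
--     for name, length in _SANGUO_ERAS:
--         if remaining < length:
--             era_name = name
--             year_in_era = remaining + 1
--             break
--         remaining -= length
--     else:
--         # 超过所有预设年号，继续沿用最后一个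
--         era_name = _SANGUO_ERAS[-1][0]
--         year_in_era = remaining + 1
--
--     return f"{era_name}{_cn_year_str(year_in_era)}{_LUNAR_MONTHS[month_idx]}月"
-- ===== SOURCE B (Python) =====
-- import bisect
--
-- _ERA_BOUNDS = [25, 32, 38, 42, 45, 55, 61, 64, 69, 74, 76, 86, 92]
-- _ERA_NAMES = ["建安", "黄初", "太和", "青龙", "景初", "正始", "嘉平",
--               "正元", "甘露", "景元", "咸熙", "泰始", "咸宁"]
-- _DIGITS = "一二三四五六七八九"
-- _MONTH_CHARS = "正二三四五六七八九十冬腊"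
--
-- def _cn_year_str(n: int) -> str:
--     if n == 1:
--         return "元年"
--     if 2 <= n <= 25:
--         u = n % 10
--         return (("二" if n >= 20 else "") + ("十" if n >= 10 else "")
--                 + (_DIGITS[u - 1] if u else "")) + "年"
--     return str(n) + "年"
--
-- def _virtual_sanguo_date(chapter: int) -> str:
--     y = (chapter - 1) // 12
--     m = (chapter - 1) % 12
--     i = bisect.bisect_right(_ERA_BOUNDS, y)
--     base = _ERA_BOUNDS[i - 1] if i > 0 else 0
--     return _ERA_NAMES[min(i, 12)] + _cn_year_str(y - base + 1) + _MONTH_CHARS[m] + "月"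
-- ===== Notes on version B (the rewrite author's own statement) =====
-- stated objective: alternative
-- what changed: Replaces A's decrement-scan over (name,length) pairs with a bisect_right lookup in a precomputed cumulative-boundary list, replaces the per-year Chinese-numeral lookup table with arithmetic composition of the numeral from digit characters, and indexes one month string instead of a month list.
-- intended difference: For chapters <= 0 (within -323..0 where A still returns), A reaches _CN_YEAR[n] with n <= 0 and Python negative-index wraparound yields accidental strings like '建安年腊月' (chapter 0), while B returns the literal numeral form '建安0年腊月', the intended value since the wraparound is an artefact. — e.g. on _virtual_sanguo_date(0): A returns "建安年腊月", B returns "建安0年腊月"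
-- outside the precondition, e.g. on _virtual_sanguo_date(-324): A raises IndexError, B returns '建安-27年腊月'
import Mathlib
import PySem

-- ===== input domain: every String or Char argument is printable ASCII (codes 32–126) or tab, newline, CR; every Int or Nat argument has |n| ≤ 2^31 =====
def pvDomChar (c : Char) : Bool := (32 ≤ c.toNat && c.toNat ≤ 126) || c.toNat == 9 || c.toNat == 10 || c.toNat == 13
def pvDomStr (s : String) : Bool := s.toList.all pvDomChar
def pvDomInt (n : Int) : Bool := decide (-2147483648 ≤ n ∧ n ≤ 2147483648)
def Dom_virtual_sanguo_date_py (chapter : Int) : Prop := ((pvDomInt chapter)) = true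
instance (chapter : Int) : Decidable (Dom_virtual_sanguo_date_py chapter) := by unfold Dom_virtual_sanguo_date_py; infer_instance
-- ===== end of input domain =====

set_option maxRecDepth 8000


-- B replaces A's decrement-scan over (name,length) pairs with a bisect_right lookup in a
-- cumulative-boundary list, composes the Chinese year numeral arithmetically from digit
-- characters instead of a 26-entry table, and indexes one month string instead of a list.
-- Equivalence is claimed outside D_ (chapter ≤ 0), where A's value is a Python
-- negative-index-wraparound artefact.

-- ===== PORT A =====
def pvErasA : List (String × Int) :=
  [("建安", 25), ("黄初", 7), ("太和", 6), ("青龙", 4), ("景初", 3),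
   ("正始", 10), ("嘉平", 6), ("正元", 3), ("甘露", 5), ("景元", 5),
   ("咸熙", 2), ("泰始", 10), ("咸宁", 6)]

def pvMonthsA : List String :=
  ["正", "二", "三", "四", "五", "六", "七", "八", "九", "十", "冬", "腊"]

def pvCnYearA : List String :=
  ["", "一", "二", "三", "四", "五", "六", "七", "八", "九", "十",
   "十一", "十二", "十三", "十四", "十五", "十六", "十七", "十八", "十九", "二十",
   "二十一", "二十二", "二十三", "二十四", "二十五"]

-- _cn_year_str; _CN_YEAR[n] uses Python indexing (negative wraps) → pyGet?; none = IndexError, excluded by Pre_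
def pvCnYearStrA (n : Int) : String :=
  if n = 1 then "元年"
  else (if n < 26 then (PySem.List.pyGet? pvCnYearA n).getD "" else PySem.Int.toStr n) ++ "年"

-- the for/else scan: break on remaining < length; else-branch uses the last era name
def pvScanA : Int → List (String × Int) → String × Int
  | remaining, [] => ("咸宁", remaining + 1)   -- _SANGUO_ERAS[-1][0]
  | remaining, (name, length) :: rest =>
      if remaining < length then (name, remaining + 1) else pvScanA (remaining - length) rest

def virtual_sanguo_date_py (chapter : Int) : String :=
  let total_months := chapter - 1
  let year_offset := PySem.Int.floordiv total_months 12
  let month_idx := PySem.Int.mod total_months 12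
  let p := pvScanA year_offset pvErasA
  p.1 ++ pvCnYearStrA p.2 ++ (PySem.List.pyGet? pvMonthsA month_idx).getD "" ++ "月"

-- ===== PORT B =====
def pvBoundsB : List Int := [25, 32, 38, 42, 45, 55, 61, 64, 69, 74, 76, 86, 92]

def pvNamesB : List String :=
  ["建安", "黄初", "太和", "青龙", "景初", "正始", "嘉平",
   "正元", "甘露", "景元", "咸熙", "泰始", "咸宁"]

-- _cn_year_str of B: numeral composed from tens marks and a digit character
def pvCnYearStrB (n : Int) : String :=
  if n = 1 then "元年"
  else if 2 ≤ n ∧ n ≤ 25 then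
    let u := PySem.Int.mod n 10
    (if 20 ≤ n then "二" else "") ++ (if 10 ≤ n then "十" else "") ++
      (if u ≠ 0 then String.singleton ((PySem.Str.pyGet? "一二三四五六七八九" (u - 1)).getD ' ') else "") ++ "年"
  else PySem.Int.toStr n ++ "年"

def virtual_sanguo_date_py_alt (chapter : Int) : String :=
  let y := PySem.Int.floordiv (chapter - 1) 12
  let m := PySem.Int.mod (chapter - 1) 12
  let i := PySem.List.bisectRight pvBoundsB y
  let base := if 0 < i then (pvBoundsB[i - 1]?).getD 0 else 0
  (pvNamesB[min i 12]?).getD "" ++ pvCnYearStrB (y - base + 1) ++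
    String.singleton ((PySem.Str.pyGet? "正二三四五六七八九十冬腊" m).getD ' ') ++ "月"

-- ===== PRECONDITION & SPEC =====
-- Pre_ excludes only chapter ≤ -324, where A raises IndexError (the negative year index falls below the _CN_YEAR table's wraparound range).
def Pre_virtual_sanguo_date_py (chapter : Int) : Prop := -323 ≤ chapter
instance (chapter : Int) : Decidable (Pre_virtual_sanguo_date_py chapter) := by unfold Pre_virtual_sanguo_date_py; infer_instance
def pvWitness_virtual_sanguo_date_py : Int := 1

-- For chapter ≤ 0 (inside -323..0) A's _CN_YEAR[n] is reached with n ≤ 0 and Python's negative-index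
-- wraparound yields accidental strings (e.g. "建安年腊月" at chapter 0), while B returns the intended
-- numeral form (e.g. "建安0年腊月").
def D_virtual_sanguo_date_py (chapter : Int) : Prop := chapter ≤ 0
instance (chapter : Int) : Decidable (D_virtual_sanguo_date_py chapter) := by unfold D_virtual_sanguo_date_py; infer_instance

def Spec_virtual_sanguo_date_py (chapter : Int) (out : String) : Prop :=
  ¬ D_virtual_sanguo_date_py chapter → out = virtual_sanguo_date_py_alt chapter
instance (chapter : Int) (out : String) : Decidable (Spec_virtual_sanguo_date_py chapter out) := by unfold Spec_virtual_sanguo_date_py; infer_instance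

def pvDiffWitness_virtual_sanguo_date_py : Int := 0
def pvDiffWitnessOut_virtual_sanguo_date_py : String × String := ("建安年腊月", "建安0年腊月")

-- ===== CLAIM =====
def Claim_unchanged_virtual_sanguo_date_py : Prop := ∀ (chapter : Int), Dom_virtual_sanguo_date_py chapter → Pre_virtual_sanguo_date_py chapter → Spec_virtual_sanguo_date_py chapter (virtual_sanguo_date_py chapter)
def Claim_changed_virtual_sanguo_date_py : Prop := Dom_virtual_sanguo_date_py (pvDiffWitness_virtual_sanguo_date_py) ∧ Pre_virtual_sanguo_date_py (pvDiffWitness_virtual_sanguo_date_py) ∧ D_virtual_sanguo_date_py (pvDiffWitness_virtual_sanguo_date_py) ∧ virtual_sanguo_date_py (pvDiffWitness_virtual_sanguo_date_py) = pvDiffWitnessOut_virtual_sanguo_date_py.1 ∧ virtual_sanguo_date_py_alt (pvDiffWitness_virtual_sanguo_date_py) = pvDiffWitnessOut_virtual_sanguo_date_py.2 ∧ pvDiffWitnessOut_virtual_sanguo_date_py.1 ≠ pvDiffWitnessOut_virtual_sanguo_date_py.2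
def Claim_exact_virtual_sanguo_date_py : Prop := ∀ (chapter : Int), Dom_virtual_sanguo_date_py chapter → Pre_virtual_sanguo_date_py chapter → D_virtual_sanguo_date_py chapter → virtual_sanguo_date_py chapter ≠ virtual_sanguo_date_py_alt chapter

-- ===== LEMMAS AND PROOFS =====

-- era + year-name part of each port, as a function of year_offset
def pvEraYearA (y : Int) : String := (pvScanA y pvErasA).1 ++ pvCnYearStrA (pvScanA y pvErasA).2

def pvEraYearB (y : Int) : String :=
  let i := PySem.List.bisectRight pvBoundsB y
  let base := if 0 < i then (pvBoundsB[i - 1]?).getD 0 else 0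
  (pvNamesB[min i 12]?).getD "" ++ pvCnYearStrB (y - base + 1)

def pvMonthA (m : Int) : String := (PySem.List.pyGet? pvMonthsA m).getD ""
def pvMonthB (m : Int) : String :=
  String.singleton ((PySem.Str.pyGet? "正二三四五六七八九十冬腊" m).getD ' ')

lemma pvA_decomp (c : Int) : virtual_sanguo_date_py c =
    pvEraYearA (PySem.Int.floordiv (c - 1) 12) ++
      pvMonthA (PySem.Int.mod (c - 1) 12) ++ "月" := rfl

lemma pvB_decomp (c : Int) : virtual_sanguo_date_py_alt c =
    pvEraYearB (PySem.Int.floordiv (c - 1) 12) ++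
      pvMonthB (PySem.Int.mod (c - 1) 12) ++ "月" := rfl

lemma pvMonth_eq : ∀ k : Nat, k < 12 → pvMonthA (k : Int) = pvMonthB (k : Int) := by decide

lemma pvScanA_big (y : Int) (h : 92 ≤ y) : pvScanA y pvErasA = ("咸宁", y - 92 + 1) := by
  simp only [pvErasA, pvScanA]
  rw [if_neg (by omega), if_neg (by omega), if_neg (by omega), if_neg (by omega),
      if_neg (by omega), if_neg (by omega), if_neg (by omega), if_neg (by omega),
      if_neg (by omega), if_neg (by omega), if_neg (by omega), if_neg (by omega),
      if_neg (by omega)]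
  rw [Prod.mk.injEq]; exact ⟨rfl, by omega⟩

lemma pvBisect_big (y : Int) (h : 92 ≤ y) : PySem.List.bisectRight pvBoundsB y = 13 := by
  obtain ⟨hle, -, hgt⟩ := PySem.List.bisectRight_spec pvBoundsB y (by decide)
  by_contra hne
  have hlen : pvBoundsB.length = 13 := by decide
  rw [hlen] at hle
  have hx := hgt 12 (by decide) (by omega)
  have h92 : pvBoundsB[12]'(by decide) = (92 : Int) := by decide
  rw [h92] at hx
  omega

lemma pvEraYear_small : ∀ k : Nat, k < 117 → pvEraYearA (k : Int) = pvEraYearB (k : Int) := by decide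

lemma pvEraYear_eq (y : Int) (hy : 0 ≤ y) : pvEraYearA y = pvEraYearB y := by
  by_cases hbig : 117 ≤ y
  · have hA : pvEraYearA y = "咸宁" ++ pvCnYearStrA (y - 92 + 1) := by
      unfold pvEraYearA; rw [pvScanA_big y (by omega)]
    have hB : pvEraYearB y = "咸宁" ++ pvCnYearStrB (y - 92 + 1) := by
      unfold pvEraYearB
      rw [pvBisect_big y (by omega)]
      norm_num [pvNamesB, pvBoundsB]
    rw [hA, hB]
    unfold pvCnYearStrA pvCnYearStrB
    rw [if_neg (by omega), if_neg (by omega), if_neg (by omega), if_neg (by omega)]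
  · obtain ⟨k, rfl⟩ : ∃ k : Nat, y = (k : Int) := ⟨y.toNat, (Int.toNat_of_nonneg hy).symm⟩
    exact pvEraYear_small k (by omega)

lemma pv_main (c : Int) (hc : 1 ≤ c) :
    virtual_sanguo_date_py c = virtual_sanguo_date_py_alt c := by
  have hy : 0 ≤ PySem.Int.floordiv (c - 1) 12 := by
    have := PySem.Int.le_floordiv_iff_mul_le (a := c - 1) (b := 12) (q := 0) (by omega)
    omega
  have hm0 : 0 ≤ PySem.Int.mod (c - 1) 12 := PySem.Int.mod_nonneg _ (by omega)
  have hm12 : PySem.Int.mod (c - 1) 12 < 12 := PySem.Int.mod_lt _ (by omega)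
  have hmeq : pvMonthA (PySem.Int.mod (c - 1) 12) = pvMonthB (PySem.Int.mod (c - 1) 12) := by
    have h := pvMonth_eq (PySem.Int.mod (c - 1) 12).toNat (by omega)
    rwa [Int.toNat_of_nonneg hm0] at h
  rw [pvA_decomp, pvB_decomp, pvEraYear_eq _ hy, hmeq]

lemma pv_exact_small : ∀ k : Nat, k < 324 →
    virtual_sanguo_date_py (-(k : Int)) ≠ virtual_sanguo_date_py_alt (-(k : Int)) := by decide

-- ===== VERDICT =====
theorem virtual_sanguo_date_py_spec : Claim_unchanged_virtual_sanguo_date_py := by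
  intro c _ _ hnd
  exact pv_main c (by unfold D_virtual_sanguo_date_py at hnd; omega)

theorem virtual_sanguo_date_py_changed : Claim_changed_virtual_sanguo_date_py := by
  unfold Claim_changed_virtual_sanguo_date_py; decide

theorem virtual_sanguo_date_py_tight : Claim_exact_virtual_sanguo_date_py := by
  intro c _ hpre hd
  unfold Pre_virtual_sanguo_date_py at hpre
  unfold D_virtual_sanguo_date_py at hd
  have : c = -(((-c).toNat : Nat) : Int) := by omega
  rw [this]
  exact pv_exact_small (-c).toNat (by omega)
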